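-- pv_equiv track=rewrite | github.com/bl00dybear/Logo_Similarity | scripts/utils.py | construct_label_domain_dict
-- ===== SOURCE A (Python) =====
-- def construct_label_domain_dict(labels, logo_dict, valid_domains):
--     label_domain_dict = {}
--     index = 0
--
--     for domain in valid_domains:
--         if logo_dict[domain][0] is not None:
--             if labels[index] not in label_domain_dict:
--                 label_domain_dict[labels[index]] = [domain]
--             else:
--                 label_domain_dict[labels[index]].append(domain)
--             index += int(logo_dict[domain][1])
--
--     return label_domain_dict
-- ===== SOURCE B (Python) =====
-- def construct_label_domain_dict(labels, logo_dict, valid_domains):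
--     # pass 1: the domains that carry a logo
--     passing = [d for d in valid_domains if logo_dict[d][0] is not None]
--     # pass 2: prefix-sum table of label indices (k-th passing domain ->
--     # sum of the weights of the previous passing domains)
--     indices = []
--     start = 0
--     for d in passing:
--         indices.append(start)
--         start += int(logo_dict[d][1])
--     # pass 3: group each passing domain under its label
--     result = {}
--     for d, i in zip(passing, indices):
--         result.setdefault(labels[i], []).append(d)
--     return result
-- ===== Notes on version B (the rewrite author's own statement) =====
-- stated objective: alternative
-- what changed: Replaces A's single interleaved loop (filter + running index + grouping in one body) by three separately shaped passes: a filter building the passing domains, a prefix-sum pass computing each domain's label index, and a grouping pass via dict.setdefault over the zipped pairs.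
import Mathlib
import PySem

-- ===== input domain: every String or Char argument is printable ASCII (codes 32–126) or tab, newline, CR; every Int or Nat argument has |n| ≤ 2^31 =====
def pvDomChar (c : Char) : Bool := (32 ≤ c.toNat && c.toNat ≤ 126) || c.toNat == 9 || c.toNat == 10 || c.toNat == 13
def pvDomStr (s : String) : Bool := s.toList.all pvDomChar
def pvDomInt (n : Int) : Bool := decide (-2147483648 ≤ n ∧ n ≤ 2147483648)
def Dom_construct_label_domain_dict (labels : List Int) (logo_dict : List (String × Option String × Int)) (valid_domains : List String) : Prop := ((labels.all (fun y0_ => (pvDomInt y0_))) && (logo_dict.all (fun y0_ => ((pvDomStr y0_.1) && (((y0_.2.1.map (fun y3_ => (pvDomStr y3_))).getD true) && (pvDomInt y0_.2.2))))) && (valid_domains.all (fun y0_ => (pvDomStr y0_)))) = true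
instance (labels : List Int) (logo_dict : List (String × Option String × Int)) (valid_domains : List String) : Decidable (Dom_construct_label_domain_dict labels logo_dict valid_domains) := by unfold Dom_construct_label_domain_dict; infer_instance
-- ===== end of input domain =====

-- ===== PORT A =====
-- B re-implements A's single interleaved loop as three separate passes (filter, prefix-sum index table, grouping);
-- equal on all inputs where A returns (Pre_); A mutates nothing observable.

-- the for-loop of A: state = (accumulated dict, index); none = an exception (KeyError / IndexError)
def pvLoopA (labels : List Int) (logo : PySem.Dict String (Option String × Int)) :
    List String → PySem.Dict Int (List String) → Int → Option (PySem.Dict Int (List String))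
  | [], acc, _ => some acc
  | dom :: rest, acc, index =>
    match logo.get? dom with
    | none => none                                   -- logo_dict[domain] -> KeyError
    | some pr =>
      if pr.1 ≠ none then
        match PySem.List.pyGet? labels index with
        | none => none                               -- labels[index] -> IndexError
        | some lab =>
          let acc' := if acc.contains lab = false
                      then acc.insert lab [dom]      -- label_domain_dict[labels[index]] = [domain]
                      else acc.modify lab [] (· ++ [dom])   -- .append(domain)
          pvLoopA labels logo rest acc' (index + pr.2)      -- index += int(logo_dict[domain][1])
      else pvLoopA labels logo rest acc index

def construct_label_domain_dict (labels : List Int) (logo_dict : List (String × Option String × Int)) (valid_domains : List String) : List (Int × List String) :=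
  ((pvLoopA labels (PySem.Dict.mk logo_dict) valid_domains PySem.Dict.empty 0).map PySem.Dict.items).getD []

-- ===== PORT B =====
-- pass 1: [d for d in valid_domains if logo_dict[d][0] is not None]
def pvPassing (logo : PySem.Dict String (Option String × Int)) : List String → Option (List String)
  | [] => some []
  | d :: rest =>
    match logo.get? d with
    | none => none
    | some pr =>
      if pr.1 ≠ none then (pvPassing logo rest).map (d :: ·)
      else pvPassing logo rest

-- pass 2: the prefix-sum table of start indices
def pvIndices (logo : PySem.Dict String (Option String × Int)) : List String → Int → Option (List Int)
  | [], _ => some []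
  | d :: rest, start =>
    match logo.get? d with
    | none => none
    | some pr => (pvIndices logo rest (start + pr.2)).map (start :: ·)

-- pass 3: result.setdefault(labels[i], []).append(d) over the zipped pairs
def pvGroup (labels : List Int) : List (String × Int) → PySem.Dict Int (List String) → Option (PySem.Dict Int (List String))
  | [], acc => some acc
  | (d, i) :: rest, acc =>
    match PySem.List.pyGet? labels i with
    | none => none
    | some lab => pvGroup labels rest (acc.modify lab [] (· ++ [d]))

def construct_label_domain_dict_alt (labels : List Int) (logo_dict : List (String × Option String × Int)) (valid_domains : List String) : List (Int × List String) :=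
  (((pvPassing (PySem.Dict.mk logo_dict) valid_domains).bind fun ps =>
      (pvIndices (PySem.Dict.mk logo_dict) ps 0).bind fun is =>
        pvGroup labels (ps.zip is) PySem.Dict.empty).map PySem.Dict.items).getD []

-- ===== PRECONDITION & SPEC =====
-- weights of the passing domains, in order (used only to state where A returns normally)
def pvPassWeights (logo_dict : List (String × Option String × Int)) (valid_domains : List String) : List Int :=
  valid_domains.filterMap fun d =>
    match (PySem.Dict.mk logo_dict).get? d with
    | some (some _, w) => some w
    | _ => none

-- exactly the inputs on which Python A returns: every domain is a key of logo_dict and every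
-- label index A reads (the prefix sums of the passing weights) is a valid Python index into labels
def Pre_construct_label_domain_dict (labels : List Int) (logo_dict : List (String × Option String × Int)) (valid_domains : List String) : Prop :=
  (∀ d ∈ valid_domains, ((PySem.Dict.mk logo_dict).get? d).isSome) ∧
  (∀ k < (pvPassWeights logo_dict valid_domains).length,
     PySem.Raise.InRange labels.length (((pvPassWeights logo_dict valid_domains).take k).sum))
instance (labels : List Int) (logo_dict : List (String × Option String × Int)) (valid_domains : List String) : Decidable (Pre_construct_label_domain_dict labels logo_dict valid_domains) := by unfold Pre_construct_label_domain_dict; infer_instance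

def pvWitness_construct_label_domain_dict : List Int × (List (String × Option String × Int)) × List String :=
  ([7, 9], [("a", (some "x", 1)), ("b", (none, 0)), ("c", (some "y", 1))], ["a", "b", "c"])

def Spec_construct_label_domain_dict (labels : List Int) (logo_dict : List (String × Option String × Int)) (valid_domains : List String) (out : List (Int × List String)) : Prop := out = construct_label_domain_dict_alt labels logo_dict valid_domains
instance (labels : List Int) (logo_dict : List (String × Option String × Int)) (valid_domains : List String) (out : List (Int × List String)) : Decidable (Spec_construct_label_domain_dict labels logo_dict valid_domains out) := by unfold Spec_construct_label_domain_dict; infer_instance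

-- ===== CLAIM (what is proved, stated in full; the proofs are below) =====
def Claim_equal_construct_label_domain_dict : Prop := ∀ (labels : List Int) (logo_dict : List (String × Option String × Int)) (valid_domains : List String), Dom_construct_label_domain_dict labels logo_dict valid_domains → Pre_construct_label_domain_dict labels logo_dict valid_domains → Spec_construct_label_domain_dict labels logo_dict valid_domains (construct_label_domain_dict labels logo_dict valid_domains)

-- ===== LEMMAS AND PROOFS =====

-- A's first-insertion branch is exactly what modify does on an absent key
theorem pv_step_eq (acc : PySem.Dict Int (List String)) (lab : Int) (dom : String) :
    (if acc.contains lab = false then acc.insert lab [dom] else acc.modify lab [] (· ++ [dom]))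
      = acc.modify lab [] (· ++ [dom]) := by
  by_cases h : acc.contains lab = false
  · have hd : acc.getD lab [] = [] := PySem.Dict.getD_of_not_contains acc ([] : List String) h
    simp [h, PySem.Dict.modify, PySem.Dict.insert, hd]
  · simp [h]

-- A's loop = B's three passes, for any loop state (unconditionally: both sides are none on exceptions)
theorem pv_main (labels : List Int) (logo : PySem.Dict String (Option String × Int)) :
    ∀ (vd : List String) (acc : PySem.Dict Int (List String)) (index : Int),
      pvLoopA labels logo vd acc index =
        (pvPassing logo vd).bind fun ps =>
          (pvIndices logo ps index).bind fun is =>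
            pvGroup labels (ps.zip is) acc := by
  intro vd
  induction vd with
  | nil => intro acc index; simp [pvLoopA, pvPassing, pvIndices, pvGroup]
  | cons dom rest ih =>
    intro acc index
    cases h : logo.get? dom with
    | none => simp [pvLoopA, pvPassing, h]
    | some pr =>
      obtain ⟨f, w⟩ := pr
      cases f with
      | none => simpa [pvLoopA, pvPassing, h] using ih acc index
      | some s =>
        cases hg : PySem.List.pyGet? labels index with
        | none =>
          cases hps : pvPassing logo rest with
          | none => simp [pvLoopA, pvPassing, h, hps, hg]
          | some ps =>
            cases his : pvIndices logo ps (index + w) with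
            | none => simp [pvLoopA, pvPassing, pvIndices, h, hps, his, hg]
            | some is => simp [pvLoopA, pvPassing, pvIndices, pvGroup, List.zip, h, hps, his, hg]
        | some lab =>
          have hstep : pvLoopA labels logo (dom :: rest) acc index
              = pvLoopA labels logo rest (acc.modify lab [] (· ++ [dom])) (index + w) := by
            simp [pvLoopA, h, hg, pv_step_eq]
          rw [hstep, ih]
          cases hps : pvPassing logo rest with
          | none => simp [pvPassing, h, hps]
          | some ps =>
            cases his : pvIndices logo ps (index + w) with
            | none => simp [pvPassing, pvIndices, h, hps, his]
            | some is => simp [pvPassing, pvIndices, pvGroup, List.zip, h, hps, his, hg]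

-- ===== VERDICT (by name: the statement is the Claim_ definition above) =====
theorem construct_label_domain_dict_spec : Claim_equal_construct_label_domain_dict := by
  intro labels logo_dict valid_domains _ _
  unfold Spec_construct_label_domain_dict construct_label_domain_dict construct_label_domain_dict_alt
  rw [pv_main]
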